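-- pv_equiv track=rewrite | github.com/stanfordnlp/dspy | test_before_pypi/lib/python3.9/site-packages/litellm/integrations/SlackAlerting/slack_alerting.py | _count_outage_alerts
-- ===== SOURCE A (Python) =====
-- from typing import TYPE_CHECKING, Any, Dict, List, Literal, Optional, Union
--
-- def _count_outage_alerts(alerts: List[int]) -> str:
--     """
--     Parameters:
--     - alerts: List[int] -> list of error codes (either 408 or 500+)
--
--     Returns:
--     - str -> formatted string. This is an alert message, giving a human-friendly description of the errors.
--     """
--     error_breakdown = {"Timeout Errors": 0, "API Errors": 0, "Unknown Errors": 0}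
--     for alert in alerts:
--         if alert == 408:
--             error_breakdown["Timeout Errors"] += 1
--         elif alert >= 500:
--             error_breakdown["API Errors"] += 1
--         else:
--             error_breakdown["Unknown Errors"] += 1
--
--     error_msg = ""
--     for key, value in error_breakdown.items():
--         if value > 0:
--             error_msg += "\n{}: {}\n".format(key, value)
--
--     return error_msg
-- ===== SOURCE B (Python) =====
-- def _count_outage_alerts(alerts):
--     timeout = sum(1 for a in alerts if a == 408)
--     api = sum(1 for a in alerts if a >= 500)
--     unknown = sum(1 for a in alerts if a != 408 and a < 500)
--     return "".join(
--         "\n{}: {}\n".format(label, value)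
--         for label, value in [
--             ("Timeout Errors", timeout),
--             ("API Errors", api),
--             ("Unknown Errors", unknown),
--         ]
--         if value > 0
--     )
-- ===== Notes on version B (the rewrite author's own statement) =====
-- stated objective: simpler
-- what changed: Replaced the single branching pass into a mutable dict plus an items loop with three independent filtered counts over the list and a join over the fixed (label, count) sequence filtered to positive counts.
import Mathlib
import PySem

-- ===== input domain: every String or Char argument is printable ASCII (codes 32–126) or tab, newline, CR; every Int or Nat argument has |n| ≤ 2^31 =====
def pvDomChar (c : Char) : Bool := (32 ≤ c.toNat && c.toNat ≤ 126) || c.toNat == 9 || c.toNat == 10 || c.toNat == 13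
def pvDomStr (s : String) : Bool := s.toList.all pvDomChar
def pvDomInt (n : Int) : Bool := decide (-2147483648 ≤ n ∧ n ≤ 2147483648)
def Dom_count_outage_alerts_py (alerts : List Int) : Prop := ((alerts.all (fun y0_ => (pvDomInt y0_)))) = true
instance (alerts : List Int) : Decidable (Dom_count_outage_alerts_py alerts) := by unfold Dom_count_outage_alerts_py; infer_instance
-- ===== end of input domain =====

-- B replaces A's single branching pass and dict with three independent filtered counts and a join over a fixed label list (objective: simpler).

-- ===== PORT A =====
def count_outage_alerts_py (alerts : List Int) : String :=
  let d0 : PySem.Dict String Int :=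
    PySem.Dict.mk [("Timeout Errors", 0), ("API Errors", 0), ("Unknown Errors", 0)]
  let d := alerts.foldl (fun d alert =>
    if alert = 408 then d.modify "Timeout Errors" 0 (· + 1)
    else if 500 ≤ alert then d.modify "API Errors" 0 (· + 1)
    else d.modify "Unknown Errors" 0 (· + 1)) d0
  d.items.foldl (fun msg kv =>
    if kv.2 > 0 then msg ++ ("\n" ++ kv.1 ++ ": " ++ PySem.Int.toStr kv.2 ++ "\n") else msg) ""

-- ===== PORT B =====
def count_outage_alerts_py_alt (alerts : List Int) : String :=
  let timeout : Int := ((alerts.filter (fun a => a = 408)).length : Int)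
  let api : Int := ((alerts.filter (fun a => 500 ≤ a)).length : Int)
  let unknown : Int := ((alerts.filter (fun a => a ≠ 408 ∧ a < 500)).length : Int)
  PySem.Str.join ""
    ((([("Timeout Errors", timeout), ("API Errors", api), ("Unknown Errors", unknown)]).filter
        (fun p => p.2 > 0)).map
      (fun p => "\n" ++ p.1 ++ ": " ++ PySem.Int.toStr p.2 ++ "\n"))

-- ===== PRECONDITION & SPEC =====
def Spec_count_outage_alerts_py (alerts : List Int) (out : String) : Prop := out = count_outage_alerts_py_alt alerts
instance (alerts : List Int) (out : String) : Decidable (Spec_count_outage_alerts_py alerts out) := by unfold Spec_count_outage_alerts_py; infer_instance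

-- ===== CLAIM (what is proved, stated in full; the proofs are below) =====
def Claim_equal_count_outage_alerts_py : Prop := ∀ (alerts : List Int), Dom_count_outage_alerts_py alerts → Spec_count_outage_alerts_py alerts (count_outage_alerts_py alerts)

-- ===== LEMMAS AND PROOFS =====

-- A's counting fold over the three-key dict, characterised by B's three filtered counts.
theorem pv_dict_fold (alerts : List Int) (t a u : Int) :
    alerts.foldl (fun d alert =>
      if alert = 408 then d.modify "Timeout Errors" 0 (· + 1)
      else if 500 ≤ alert then d.modify "API Errors" 0 (· + 1)
      else d.modify "Unknown Errors" 0 (· + 1))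
      (PySem.Dict.mk [("Timeout Errors", t), ("API Errors", a), ("Unknown Errors", u)])
    = PySem.Dict.mk
        [("Timeout Errors", t + ((alerts.filter (fun x => x = 408)).length : Int)),
         ("API Errors", a + ((alerts.filter (fun x => 500 ≤ x)).length : Int)),
         ("Unknown Errors", u + ((alerts.filter (fun x => x ≠ 408 ∧ x < 500)).length : Int))] := by
  induction alerts generalizing t a u with
  | nil => simp [List.filter]
  | cons x xs ih =>
    simp only [List.foldl_cons]
    by_cases h408 : x = 408
    · have h500 : ¬ (500 ≤ x) := by omega
      have hlt : x < 500 := by omega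
      rw [if_pos h408]
      rw [show (PySem.Dict.mk [("Timeout Errors", t), ("API Errors", a), ("Unknown Errors", u)]).modify "Timeout Errors" 0 (· + 1)
          = PySem.Dict.mk [("Timeout Errors", t + 1), ("API Errors", a), ("Unknown Errors", u)] from by
        simp [PySem.Dict.modify, PySem.Dict.insert, PySem.Dict.getD, PySem.Dict.get?, PySem.Dict.contains]]
      rw [ih]
      simp [h408]
      ring
    · by_cases h500 : 500 ≤ x
      · have hlt : ¬ (x < 500) := by omega
        rw [if_neg h408, if_pos h500]
        rw [show (PySem.Dict.mk [("Timeout Errors", t), ("API Errors", a), ("Unknown Errors", u)]).modify "API Errors" 0 (· + 1)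
            = PySem.Dict.mk [("Timeout Errors", t), ("API Errors", a + 1), ("Unknown Errors", u)] from by
          simp [PySem.Dict.modify, PySem.Dict.insert, PySem.Dict.getD, PySem.Dict.get?, PySem.Dict.contains]]
        rw [ih]
        simp [h408, h500, hlt]
        ring
      · have hlt : x < 500 := by omega
        rw [if_neg h408, if_neg h500]
        rw [show (PySem.Dict.mk [("Timeout Errors", t), ("API Errors", a), ("Unknown Errors", u)]).modify "Unknown Errors" 0 (· + 1)
            = PySem.Dict.mk [("Timeout Errors", t), ("API Errors", a), ("Unknown Errors", u + 1)] from by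
          simp [PySem.Dict.modify, PySem.Dict.insert, PySem.Dict.getD, PySem.Dict.get?, PySem.Dict.contains]]
        rw [ih]
        simp [h408, h500, hlt]
        ring

-- With the three counts abstracted, A's message fold over the literal items list
-- equals B's join over the filtered label list.
theorem pv_msg_eq (t a u : Int) :
    ([("Timeout Errors", t), ("API Errors", a), ("Unknown Errors", u)]).foldl
      (fun msg (kv : String × Int) =>
        if kv.2 > 0 then msg ++ ("\n" ++ kv.1 ++ ": " ++ PySem.Int.toStr kv.2 ++ "\n") else msg) ""
    = PySem.Str.join ""
        ((([("Timeout Errors", t), ("API Errors", a), ("Unknown Errors", u)]).filter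
            (fun p => p.2 > 0)).map
          (fun p => "\n" ++ p.1 ++ ": " ++ PySem.Int.toStr p.2 ++ "\n")) := by
  by_cases h1 : t > 0 <;> by_cases h2 : a > 0 <;> by_cases h3 : u > 0 <;>
    simp only [List.foldl_cons, List.foldl_nil, List.filter_cons, List.filter_nil,
      h1, h2, h3, decide_true, decide_false, if_pos, if_neg, not_false_iff, List.map] <;>
    (apply String.ext) <;>
    simp [PySem.Str.join, PySem.Chars.join, List.intercalate]

-- ===== VERDICT (by name: the statement is the Claim_ definition above) =====
theorem count_outage_alerts_py_spec : Claim_equal_count_outage_alerts_py := by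
  intro alerts _
  show _ = _
  simp only [count_outage_alerts_py, count_outage_alerts_py_alt]
  rw [pv_dict_fold]
  simp only [zero_add]
  exact pv_msg_eq _ _ _
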